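-- pv_equiv track=rewrite | github.com/miliar/Code_Jam_Webscraper | solutions_python/solutions_year10_round1_nr1/89.py | who_wins
-- ===== SOURCE A (Python) =====
-- def diag_1(b, idx):
--     return "".join(b[i][idx+i] for i in range(len(b) - idx))
--
-- def diag_2(b, idx):
--     return "".join(b[idx+i][i] for i in range(len(b) - idx))
--
-- def diag_3(b, idx):
--     N = len(b)
--     return "".join(b[idx+i][N - 1 - i] for i in range(len(b) - idx))
--
-- def diag_4(b, idx):
--     N = len(b)
--     return "".join(b[N -1 - idx - i][i] for i in range(len(b) - idx))
--
-- def who_wins(board, K):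
--     N = len(board)
--     all_boards = list(board)
--     all_boards.extend(["".join([board[i][j] for i in range(N)]) for j in range(N)])
--     for i in range(N):
--         all_boards.append(diag_1(board, i))
--         all_boards.append(diag_2(board, i))
--         all_boards.append(diag_3(board, i))
--         all_boards.append(diag_4(board, i))
--
--     r = "R" * K
--     b = "B" * K
--
--     rt = any([r in i for i in all_boards])
--     bt = any([b in i for i in all_boards])
--
--     if rt and bt:
--         return "Both"
--     elif rt:
--         return "Red"
--     elif bt:
--         return "Blue"
--     else:
--         return "Neither"
-- ===== SOURCE B (Python) =====
-- def who_wins(board, K):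
--     N = len(board)
--     rt = bt = False
--
--     def scan(cells):
--         nonlocal rt, bt
--         rr = br = 0
--         for ch in cells:
--             rr = rr + 1 if ch == 'R' else 0
--             br = br + 1 if ch == 'B' else 0
--             if rr >= K:
--                 rt = True
--             if br >= K:
--                 bt = True
--
--     for row in board:
--         scan(row)
--     for j in range(N):
--         scan(board[i][j] for i in range(N))
--     for idx in range(N):
--         scan(board[i][idx + i] for i in range(N - idx))
--         scan(board[idx + i][i] for i in range(N - idx))
--         scan(board[idx + i][N - 1 - i] for i in range(N - idx))
--         scan(board[N - 1 - idx - i][i] for i in range(N - idx))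
--
--     if rt and bt:
--         return "Both"
--     elif rt:
--         return "Red"
--     elif bt:
--         return "Blue"
--     else:
--         return "Neither"
-- ===== Notes on version B (the rewrite author's own statement) =====
-- stated objective: alternative
-- what changed: Instead of materialising every row/column/diagonal as a string and testing 'R'*K / 'B'*K substring membership, B walks the cells of each of the four directions once, maintaining consecutive-run counters for 'R' and 'B' and setting the two flags as soon as a run reaches K.
import Mathlib
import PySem

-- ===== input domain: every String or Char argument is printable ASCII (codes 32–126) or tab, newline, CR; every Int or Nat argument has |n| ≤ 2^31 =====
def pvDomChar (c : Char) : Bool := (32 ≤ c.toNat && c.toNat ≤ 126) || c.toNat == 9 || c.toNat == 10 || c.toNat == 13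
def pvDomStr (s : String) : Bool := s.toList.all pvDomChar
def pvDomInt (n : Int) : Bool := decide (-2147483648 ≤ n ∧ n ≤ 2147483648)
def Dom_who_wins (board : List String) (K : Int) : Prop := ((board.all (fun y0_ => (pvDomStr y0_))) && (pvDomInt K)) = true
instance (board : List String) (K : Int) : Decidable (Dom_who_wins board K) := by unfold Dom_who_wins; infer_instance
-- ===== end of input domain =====

-- B replaces A's line-string building + substring search by a direct cell scan with
-- consecutive-run counters per colour (objective: alternative decomposition, same asymptotics).

-- ===== PORT A =====
-- helpers diag_1..diag_4; lines are kept as List Char ("".join of the generated chars)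
def pvDiag1 (b : List (List Char)) (idx : Int) : List Char :=
  (PySem.List.pyRange 0 ((b.length : Int) - idx) 1).map
    (fun i => PySem.List.pyGetD (PySem.List.pyGetD b i []) (idx + i) ' ')

def pvDiag2 (b : List (List Char)) (idx : Int) : List Char :=
  (PySem.List.pyRange 0 ((b.length : Int) - idx) 1).map
    (fun i => PySem.List.pyGetD (PySem.List.pyGetD b (idx + i) []) i ' ')

def pvDiag3 (b : List (List Char)) (idx : Int) : List Char :=
  (PySem.List.pyRange 0 ((b.length : Int) - idx) 1).map
    (fun i => PySem.List.pyGetD (PySem.List.pyGetD b (idx + i) []) ((b.length : Int) - 1 - i) ' ')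

def pvDiag4 (b : List (List Char)) (idx : Int) : List Char :=
  (PySem.List.pyRange 0 ((b.length : Int) - idx) 1).map
    (fun i => PySem.List.pyGetD (PySem.List.pyGetD b ((b.length : Int) - 1 - idx - i) []) i ' ')

def who_wins (board : List String) (K : Int) : String :=
  let N : Int := board.length
  let bl : List (List Char) := board.map String.toList
  let all1 := bl ++ (PySem.List.pyRange 0 N 1).map (fun j =>
      (PySem.List.pyRange 0 N 1).map (fun i =>
        PySem.List.pyGetD (PySem.List.pyGetD bl i []) j ' '))
  let allB := (PySem.List.pyRange 0 N 1).foldl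
      (fun acc i => acc ++ [pvDiag1 bl i, pvDiag2 bl i, pvDiag3 bl i, pvDiag4 bl i]) all1
  let r := List.replicate K.toNat 'R'     -- "R" * K
  let b := List.replicate K.toNat 'B'     -- "B" * K
  let rt := allB.any (fun line => PySem.Chars.isIn r line)
  let bt := allB.any (fun line => PySem.Chars.isIn b line)
  if rt && bt then "Both" else if rt then "Red" else if bt then "Blue" else "Neither"

-- ===== PORT B =====
-- one pass over a cell sequence maintaining run counters rr/br and the two flags
def pvStep (K : Int) (s : Int × Int × Bool × Bool) (ch : Char) : Int × Int × Bool × Bool :=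
  let rr := if ch = 'R' then s.1 + 1 else 0
  let br := if ch = 'B' then s.2.1 + 1 else 0
  (rr, br, s.2.2.1 || decide (K ≤ rr), s.2.2.2 || decide (K ≤ br))

def pvScan (K : Int) (st : Bool × Bool) (cells : List Char) : Bool × Bool :=
  let s := cells.foldl (pvStep K) (0, 0, st.1, st.2)
  (s.2.2.1, s.2.2.2)

-- the cell generators of Source B
def pvColB (bl : List (List Char)) (N j : Int) : List Char :=
  (PySem.List.pyRange 0 N 1).map (fun i => PySem.List.pyGetD (PySem.List.pyGetD bl i []) j ' ')

def pvD1B (bl : List (List Char)) (N idx : Int) : List Char :=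
  (PySem.List.pyRange 0 (N - idx) 1).map (fun i => PySem.List.pyGetD (PySem.List.pyGetD bl i []) (idx + i) ' ')

def pvD2B (bl : List (List Char)) (N idx : Int) : List Char :=
  (PySem.List.pyRange 0 (N - idx) 1).map (fun i => PySem.List.pyGetD (PySem.List.pyGetD bl (idx + i) []) i ' ')

def pvD3B (bl : List (List Char)) (N idx : Int) : List Char :=
  (PySem.List.pyRange 0 (N - idx) 1).map (fun i => PySem.List.pyGetD (PySem.List.pyGetD bl (idx + i) []) (N - 1 - i) ' ')

def pvD4B (bl : List (List Char)) (N idx : Int) : List Char :=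
  (PySem.List.pyRange 0 (N - idx) 1).map (fun i => PySem.List.pyGetD (PySem.List.pyGetD bl (N - 1 - idx - i) []) i ' ')

def who_wins_alt (board : List String) (K : Int) : String :=
  let N : Int := board.length
  let bl : List (List Char) := board.map String.toList
  let st0 := board.foldl (fun st row => pvScan K st row.toList) (false, false)
  let st1 := (PySem.List.pyRange 0 N 1).foldl (fun st j => pvScan K st (pvColB bl N j)) st0
  let st2 := (PySem.List.pyRange 0 N 1).foldl (fun st idx =>
      pvScan K (pvScan K (pvScan K (pvScan K st (pvD1B bl N idx)) (pvD2B bl N idx))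
        (pvD3B bl N idx)) (pvD4B bl N idx)) st1
  if st2.1 && st2.2 then "Both" else if st2.1 then "Red" else if st2.2 then "Blue" else "Neither"

-- ===== PRECONDITION & SPEC =====
-- Pre_ = exactly the boards A returns on: every row at least N characters long (a shorter row raises IndexError)
def Pre_who_wins (board : List String) (K : Int) : Prop :=
  ∀ s ∈ board, board.length ≤ s.toList.length
instance (board : List String) (K : Int) : Decidable (Pre_who_wins board K) := by
  unfold Pre_who_wins; infer_instance

def pvWitness_who_wins : List String × Int := (["RB", "BR"], 2)

def Spec_who_wins (board : List String) (K : Int) (out : String) : Prop := out = who_wins_alt board K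
instance (board : List String) (K : Int) (out : String) : Decidable (Spec_who_wins board K out) := by
  unfold Spec_who_wins; infer_instance

-- ===== CLAIM (what is proved, stated in full; the proofs are below) =====
def Claim_equal_who_wins : Prop := ∀ (board : List String) (K : Int), Dom_who_wins board K → Pre_who_wins board K → Spec_who_wins board K (who_wins board K)

-- ===== LEMMAS AND PROOFS =====

-- detector: the flag pvScan's fold accumulates for one colour, as a structural recursion
def pvDetect (K : Int) (c : Char) : Int → List Char → Bool
  | _, [] => false
  | r, ch :: rest =>
    let r' := if ch = c then r + 1 else 0
    decide (K ≤ r') || pvDetect K c r' rest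

theorem pvStep_fold_spec (K : Int) : ∀ (cs : List Char) (rr br : Int) (a b : Bool),
    (cs.foldl (pvStep K) (rr, br, a, b)).2.2.1 = (a || pvDetect K 'R' rr cs) ∧
    (cs.foldl (pvStep K) (rr, br, a, b)).2.2.2 = (b || pvDetect K 'B' br cs) := by
  intro cs
  induction cs with
  | nil => intro rr br a b; constructor <;> simp [pvDetect]
  | cons ch rest ih =>
    intro rr br a b
    simp only [List.foldl_cons, pvStep]
    constructor
    · rw [(ih _ _ _ _).1]; simp [pvDetect, Bool.or_assoc]
    · rw [(ih _ _ _ _).2]; simp [pvDetect, Bool.or_assoc]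

theorem pvScan_spec (K : Int) (st : Bool × Bool) (cs : List Char) :
    pvScan K st cs = (st.1 || pvDetect K 'R' 0 cs, st.2 || pvDetect K 'B' 0 cs) := by
  obtain ⟨h1, h2⟩ := pvStep_fold_spec K cs 0 0 st.1 st.2
  simp only [pvScan]
  rw [h1, h2]

theorem pvDetect_mono (K : Int) (c : Char) : ∀ (cs : List Char) (r r' : Int), r ≤ r' →
    pvDetect K c r cs = true → pvDetect K c r' cs = true := by
  intro cs
  induction cs with
  | nil => intro r r' _ h; simpa [pvDetect] using h
  | cons ch rest ih =>
    intro r r' hle h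
    simp only [pvDetect, Bool.or_eq_true, decide_eq_true_eq] at h ⊢
    have hle' : (if ch = c then r + 1 else 0) ≤ (if ch = c then r' + 1 else 0) := by
      split <;> omega
    rcases h with h | h
    · exact Or.inl (le_trans h hle')
    · exact Or.inr (ih _ _ hle' h)

theorem pvDetect_of_prefix (K : Int) (c : Char) : ∀ (j : Nat) (cs : List Char) (r : Int),
    List.replicate j c <+: cs → K ≤ r + j → 1 ≤ j → pvDetect K c r cs = true := by
  intro j
  induction j with
  | zero => intro cs r _ _ h1; omega
  | succ j ih =>
    intro cs r hpre hK _
    cases cs with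
    | nil =>
      have hl := hpre.length_le
      simp at hl
    | cons ch rest =>
      rw [List.replicate_succ, List.cons_prefix_cons] at hpre
      obtain ⟨hch, hpre'⟩ := hpre
      subst hch
      by_cases hK1 : K ≤ r + 1
      · simp [pvDetect, hK1]
      · have h1j : 1 ≤ j := by omega
        have hrec := ih rest (r + 1) hpre' (by push_cast at hK ⊢; omega) h1j
        simp [pvDetect, hrec]

theorem pvDetect_infix (K : Int) (c : Char) (hK : 0 < K) : ∀ (cs : List Char) (r : Int), 0 ≤ r →
    pvDetect K c r cs = true → List.replicate K.toNat c <:+: (List.replicate r.toNat c ++ cs) := by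
  intro cs
  induction cs with
  | nil => intro r _ h; simp [pvDetect] at h
  | cons ch rest ih =>
    intro r hr h
    simp only [pvDetect, Bool.or_eq_true, decide_eq_true_eq] at h
    have key : ∀ (t : List Char), List.replicate r.toNat c ++ c :: t = List.replicate (r.toNat + 1) c ++ t := by
      intro t
      rw [List.replicate_succ', List.append_assoc]
      rfl
    by_cases hc : ch = c
    · subst hc
      rw [if_pos rfl] at h
      rw [key rest]
      rcases h with h | h
      · have hle : K.toNat ≤ r.toNat + 1 := by omega
        refine (List.IsPrefix.trans ?_ (List.prefix_append _ _)).isInfix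
        exact ⟨List.replicate (r.toNat + 1 - K.toNat) ch, by
          rw [← List.replicate_add]; congr 1; omega⟩
      · have hrec := ih (r + 1) (by omega) h
        have ht : (r + 1).toNat = r.toNat + 1 := by omega
        rwa [ht] at hrec
    · rw [if_neg hc] at h
      rcases h with h | h
      · omega
      · have hrec := ih 0 le_rfl h
        simp only [Int.toNat_zero, List.replicate_zero, List.nil_append] at hrec
        refine hrec.trans ⟨List.replicate r.toNat c ++ [ch], [], by simp⟩

theorem infix_pvDetect (K : Int) (c : Char) (hK : 0 < K) : ∀ (cs : List Char),
    List.replicate K.toNat c <:+: cs → pvDetect K c 0 cs = true := by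
  intro cs
  induction cs with
  | nil =>
    intro h
    rw [List.infix_nil] at h
    simp only [List.replicate_eq_nil_iff] at h
    omega
  | cons ch rest ih =>
    intro h
    rcases List.infix_cons_iff.mp h with h | h
    · exact pvDetect_of_prefix K c K.toNat _ 0 h (by omega) (by omega)
    · have hd := ih h
      have hmono : pvDetect K c (if ch = c then (1:Int) else 0) rest = true :=
        pvDetect_mono K c rest 0 _ (by split <;> omega) hd
      simp [pvDetect]
      exact Or.inr hmono

theorem pvDetect_eq_isIn (K : Int) (c : Char) (cs : List Char) (h : cs ≠ []) :
    pvDetect K c 0 cs = PySem.Chars.isIn (List.replicate K.toNat c) cs := by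
  rcases (show 0 < K ∨ K ≤ 0 by omega) with hK | hK
  · rw [Bool.eq_iff_iff]
    constructor
    · intro hd
      apply (PySem.Chars.isIn_iff_infix _ _).mpr
      exact pvDetect_infix K c hK cs 0 le_rfl hd |> fun hi => by
        simp only [Int.toNat_zero, List.replicate_zero, List.nil_append] at hi
        exact hi
    · intro hi
      exact infix_pvDetect K c hK cs ((PySem.Chars.isIn_iff_infix _ _).mp hi)
  · have h0 : K.toNat = 0 := by omega
    rw [h0, List.replicate_zero, PySem.Chars.isIn_nil]
    cases cs with
    | nil => exact absurd rfl h
    | cons ch rest =>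
      have hle : K ≤ (if ch = c then (1:Int) else 0) := by split <;> omega
      simp [pvDetect]
      exact Or.inl hle

theorem pvAnyCongrMem {α : Type} (l : List α) (p q : α → Bool)
    (h : ∀ a ∈ l, p a = q a) : l.any p = l.any q := by
  induction l with
  | nil => rfl
  | cons a t ih =>
    simp only [List.any_cons]
    rw [h a (by simp), ih (fun x hx => h x (List.mem_cons_of_mem _ hx))]

theorem foldl_scan_spec {α : Type} (K : Int) (g : α → List Char) : ∀ (l : List α) (st : Bool × Bool),
    l.foldl (fun st x => pvScan K st (g x)) st
      = (st.1 || l.any (fun x => pvDetect K 'R' 0 (g x)), st.2 || l.any (fun x => pvDetect K 'B' 0 (g x))) := by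
  intro l
  induction l with
  | nil => intro st; simp
  | cons x t ih =>
    intro st
    simp only [List.foldl_cons, List.any_cons]
    rw [pvScan_spec, ih]
    simp [Bool.or_assoc]

theorem foldl_scan4_spec {α : Type} (K : Int) (g1 g2 g3 g4 : α → List Char) : ∀ (l : List α) (st : Bool × Bool),
    l.foldl (fun st x => pvScan K (pvScan K (pvScan K (pvScan K st (g1 x)) (g2 x)) (g3 x)) (g4 x)) st
      = (st.1 || l.any (fun x => pvDetect K 'R' 0 (g1 x) || (pvDetect K 'R' 0 (g2 x) || (pvDetect K 'R' 0 (g3 x) || pvDetect K 'R' 0 (g4 x)))),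
         st.2 || l.any (fun x => pvDetect K 'B' 0 (g1 x) || (pvDetect K 'B' 0 (g2 x) || (pvDetect K 'B' 0 (g3 x) || pvDetect K 'B' 0 (g4 x))))) := by
  intro l
  induction l with
  | nil => intro st; simp
  | cons x t ih =>
    intro st
    simp only [List.foldl_cons, List.any_cons]
    rw [pvScan_spec, pvScan_spec, pvScan_spec, pvScan_spec, ih]
    simp [Bool.or_assoc]

-- ===== VERDICT (by name: the statement is the Claim_ definition above) =====
theorem who_wins_spec : Claim_equal_who_wins := by
  intro board K _ hPre
  unfold Spec_who_wins
  by_cases hb : board = []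
  · subst hb
    have h0 : PySem.List.pyRange 0 0 1 = [] := by decide
    simp [who_wins, who_wins_alt, h0]
  · have hlen : 0 < board.length := by
      cases board with
      | nil => exact absurd rfl hb
      | cons _ _ => simp
    have hNpos : (0:Int) < (board.length : Int) := by exact_mod_cast hlen
    have hrow : ∀ s ∈ board, s.toList ≠ [] := by
      intro s hs he
      have h1 := hPre s hs
      rw [he] at h1
      simp only [List.length_nil, Nat.le_zero] at h1
      omega
    have hmapne : ∀ {β : Type} (f : Int → β) (m : Int), 0 < m →
        (PySem.List.pyRange 0 m 1).map f ≠ [] := by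
      intro β f m hm h
      rw [List.map_eq_nil_iff] at h
      have h0 : (0:Int) ∈ PySem.List.pyRange 0 m 1 := PySem.List.mem_pyRange_one.mpr ⟨le_refl 0, hm⟩
      rw [h] at h0
      simp at h0
    have hrows : ∀ c : Char,
        board.any (fun s => pvDetect K c 0 s.toList)
          = board.any (fun s => PySem.Chars.isIn (List.replicate K.toNat c) s.toList) :=
      fun c => pvAnyCongrMem _ _ _ (fun s hs => pvDetect_eq_isIn K c _ (hrow s hs))
    have hcols : ∀ c : Char,
        (PySem.List.pyRange 0 (board.length : Int) 1).any
            (fun j => pvDetect K c 0 (pvColB (board.map String.toList) (board.length : Int) j))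
          = (PySem.List.pyRange 0 (board.length : Int) 1).any
            (fun j => PySem.Chars.isIn (List.replicate K.toNat c) (pvColB (board.map String.toList) (board.length : Int) j)) :=
      fun c => pvAnyCongrMem _ _ _
        (fun j _ => pvDetect_eq_isIn K c _ (by unfold pvColB; exact hmapne _ _ hNpos))
    have hdiags : ∀ c : Char,
        (PySem.List.pyRange 0 (board.length : Int) 1).any
            (fun i => pvDetect K c 0 (pvD1B (board.map String.toList) (board.length : Int) i) ||
              (pvDetect K c 0 (pvD2B (board.map String.toList) (board.length : Int) i) ||
              (pvDetect K c 0 (pvD3B (board.map String.toList) (board.length : Int) i) ||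
               pvDetect K c 0 (pvD4B (board.map String.toList) (board.length : Int) i))))
          = (PySem.List.pyRange 0 (board.length : Int) 1).any
            (fun i => PySem.Chars.isIn (List.replicate K.toNat c) (pvD1B (board.map String.toList) (board.length : Int) i) ||
              (PySem.Chars.isIn (List.replicate K.toNat c) (pvD2B (board.map String.toList) (board.length : Int) i) ||
              (PySem.Chars.isIn (List.replicate K.toNat c) (pvD3B (board.map String.toList) (board.length : Int) i) ||
               PySem.Chars.isIn (List.replicate K.toNat c) (pvD4B (board.map String.toList) (board.length : Int) i)))) :=
      fun c => pvAnyCongrMem _ _ _ (fun i hi => by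
        obtain ⟨hi0, hiN⟩ := PySem.List.mem_pyRange_one.mp hi
        have hpos : 0 < (board.length : Int) - i := by omega
        rw [pvDetect_eq_isIn K c _ (by unfold pvD1B; exact hmapne _ _ hpos),
            pvDetect_eq_isIn K c _ (by unfold pvD2B; exact hmapne _ _ hpos),
            pvDetect_eq_isIn K c _ (by unfold pvD3B; exact hmapne _ _ hpos),
            pvDetect_eq_isIn K c _ (by unfold pvD4B; exact hmapne _ _ hpos)])
    have hd1 : pvDiag1 (board.map String.toList) = pvD1B (board.map String.toList) (board.length : Int) := by
      funext i; unfold pvDiag1 pvD1B; rw [List.length_map]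
    have hd2 : pvDiag2 (board.map String.toList) = pvD2B (board.map String.toList) (board.length : Int) := by
      funext i; unfold pvDiag2 pvD2B; rw [List.length_map]
    have hd3 : pvDiag3 (board.map String.toList) = pvD3B (board.map String.toList) (board.length : Int) := by
      funext i; unfold pvDiag3 pvD3B; rw [List.length_map]
    have hd4 : pvDiag4 (board.map String.toList) = pvD4B (board.map String.toList) (board.length : Int) := by
      funext i; unfold pvDiag4 pvD4B; rw [List.length_map]
    have hcolfun : ∀ j : Int,
        List.map (fun i => PySem.List.pyGetD (PySem.List.pyGetD (List.map String.toList board) i []) j ' ')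
          (PySem.List.pyRange 0 (board.length : Int) 1)
          = pvColB (board.map String.toList) (board.length : Int) j := fun _ => rfl
    simp only [who_wins, who_wins_alt, foldl_scan_spec, foldl_scan4_spec,
      PySem.List.foldl_append_eq_flatMap, List.any_append, List.any_flatMap,
      List.any_cons, List.any_nil, List.any_map, Function.comp_def,
      hd1, hd2, hd3, hd4, Bool.or_false, Bool.false_or, Bool.or_assoc]
    simp only [hcolfun]
    rw [hrows 'R', hrows 'B', hcols 'R', hcols 'B', hdiags 'R', hdiags 'B']
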